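-- pv_equiv track=rewrite | github.com/Pierre-Cognard/Application_BI | Script_python_nettoye/analyse_varchar_nettoye.py | verifier_chaine
-- ===== SOURCE A (Python) =====
-- def verifier_chaine(valeur):
--     # Suppression des tirets et des espaces
--     valeur_nettoyee = valeur.replace("-", "").replace(" ", "")
--     # Test si la chaîne est composée uniquement de Y ou uniquement de N
--     if all(caractere == "Y" for caractere in valeur_nettoyee):
--         return "Y"
--     elif all(caractere == "N" for caractere in valeur_nettoyee):
--         return "N"
--     else:
--         return "DEGAGE"
-- ===== SOURCE B (Python) =====
-- def verifier_chaine(valeur):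
--     # One pass over the raw string with three flags, no cleaned copy and no re-scans (alternative decomposition).
--     a_y = False
--     a_n = False
--     autre = False
--     for c in valeur:
--         if c == "-" or c == " ":
--             continue
--         elif c == "Y":
--             a_y = True
--         elif c == "N":
--             a_n = True
--         else:
--             autre = True
--     if autre or (a_y and a_n):
--         return "DEGAGE"
--     elif a_n:
--         return "N"
--     else:
--         return "Y"
-- ===== Notes on version B (the rewrite author's own statement) =====
-- stated objective: alternative
-- what changed: B replaces A's build-two-cleaned-copies-then-two-full-all() rescans with a single pass over the raw string maintaining three boolean flags (saw Y / saw N / saw other) and a final flag-based decision; in CPython A's C-level primitives make it faster in practice, so no speed is claimed.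
import Mathlib
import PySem

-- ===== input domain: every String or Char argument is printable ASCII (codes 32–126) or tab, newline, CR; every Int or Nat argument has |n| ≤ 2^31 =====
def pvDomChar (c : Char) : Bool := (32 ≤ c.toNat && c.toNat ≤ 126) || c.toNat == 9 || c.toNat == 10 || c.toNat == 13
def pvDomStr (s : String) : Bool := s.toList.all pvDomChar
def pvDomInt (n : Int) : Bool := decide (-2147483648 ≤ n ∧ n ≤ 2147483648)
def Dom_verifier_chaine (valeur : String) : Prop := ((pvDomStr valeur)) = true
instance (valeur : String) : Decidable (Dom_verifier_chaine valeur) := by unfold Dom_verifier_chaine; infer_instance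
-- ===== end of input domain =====

-- B replaces A's two cleaned string copies + two all() rescans with a single pass
-- keeping three boolean flags (objective: alternative single-pass decomposition; no speed claimed).


-- ===== PORT A =====
def verifier_chaine (valeur : String) : String :=
  let valeur_nettoyee := PySem.Str.replace (PySem.Str.replace valeur "-" "") " " ""
  if valeur_nettoyee.toList.all (fun caractere => caractere == 'Y') then "Y"
  else if valeur_nettoyee.toList.all (fun caractere => caractere == 'N') then "N"
  else "DEGAGE"

-- ===== PORT B =====
-- the for-loop of Source B: itérate once over the raw characters with three flags
def vcStep (st : Bool × Bool × Bool) (c : Char) : Bool × Bool × Bool :=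
  if c == '-' || c == ' ' then st
  else if c == 'Y' then (true, st.2.1, st.2.2)
  else if c == 'N' then (st.1, true, st.2.2)
  else (st.1, st.2.1, true)

def verifier_chaine_alt (valeur : String) : String :=
  let st := valeur.toList.foldl vcStep (false, false, false)
  if st.2.2 || (st.1 && st.2.1) then "DEGAGE"
  else if st.2.1 then "N"
  else "Y"

-- ===== PRECONDITION & SPEC =====
def Spec_verifier_chaine (valeur : String) (out : String) : Prop := out = verifier_chaine_alt valeur
instance (valeur : String) (out : String) : Decidable (Spec_verifier_chaine valeur out) := by unfold Spec_verifier_chaine; infer_instance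

-- ===== CLAIM (what is proved, stated in full; the proofs are below) =====
def Claim_equal_verifier_chaine : Prop := ∀ (valeur : String), Dom_verifier_chaine valeur → Spec_verifier_chaine valeur (verifier_chaine valeur)

-- ===== LEMMAS AND PROOFS =====

-- per-element predicates of the one-pass scan
def gY (c : Char) : Bool := !(c == '-' || c == ' ') && c == 'Y'
def gN (c : Char) : Bool := !(c == '-' || c == ' ') && !(c == 'Y') && c == 'N'
def gO (c : Char) : Bool := !(c == '-' || c == ' ') && !(c == 'Y') && !(c == 'N')

-- replace with a one-char pattern and empty replacement is a filter
theorem replace_go_single (d : Char) :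
    ∀ (l : List Char) (fuel : Nat) (acc : List Char), l.length ≤ fuel →
      PySem.Chars.replace.go [d] [] fuel l acc = acc.reverse ++ l.filter (fun c => !(c == d)) := by
  intro l
  induction l with
  | nil => intro fuel acc h; cases fuel <;> simp [PySem.Chars.replace.go]
  | cons c t ih =>
    intro fuel acc h
    cases fuel with
    | zero => simp at h
    | succ n =>
      simp only [List.length_cons, Nat.succ_le_succ_iff] at h
      by_cases hc : c = d
      · subst hc
        simp [PySem.Chars.replace.go, List.isPrefixOf, ih n acc h, List.filter_cons]
      · have hpre : List.isPrefixOf [d] (c :: t) = false := by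
          simp [List.isPrefixOf, beq_iff_eq]; intro h'; exact absurd h'.symm hc
        simp [PySem.Chars.replace.go, hpre, ih n (c :: acc) h, List.filter_cons,
          beq_iff_eq, hc]

theorem replace_single (d : Char) (l : List Char) :
    PySem.Chars.replace l [d] [] = l.filter (fun c => !(c == d)) := by
  simp [PySem.Chars.replace]
  exact replace_go_single d l l.length [] le_rfl

-- characterize the fold by the three any's
theorem fold_any : ∀ (l : List Char) (y n o : Bool),
    l.foldl vcStep (y, n, o) = (y || l.any gY, n || l.any gN, o || l.any gO) := by
  intro l
  induction l with
  | nil => simp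
  | cons c t ih =>
    intro y n o
    simp only [List.foldl_cons, List.any_cons]
    by_cases h1 : (c == '-' || c == ' ') = true
    · have hs : vcStep (y, n, o) c = (y, n, o) := by simp [vcStep, h1]
      have eY : gY c = false := by simp [gY, h1]
      have eN : gN c = false := by simp [gN, h1]
      have eO : gO c = false := by simp [gO, h1]
      rw [hs, ih, eY, eN, eO]; simp
    · simp only [Bool.not_eq_true] at h1
      by_cases h2 : (c == 'Y') = true
      · have hs : vcStep (y, n, o) c = (true, n, o) := by simp [vcStep, h1, h2]
        have eY : gY c = true := by simp [gY, h1, h2]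
        have eN : gN c = false := by simp [gN, h2]
        have eO : gO c = false := by simp [gO, h2]
        rw [hs, ih, eY, eN, eO]; simp
      · simp only [Bool.not_eq_true] at h2
        by_cases h3 : (c == 'N') = true
        · have hs : vcStep (y, n, o) c = (y, true, o) := by simp [vcStep, h1, h2, h3]
          have eY : gY c = false := by simp [gY, h2]
          have eN : gN c = true := by simp [gN, h1, h2, h3]
          have eO : gO c = false := by simp [gO, h3]
          rw [hs, ih, eY, eN, eO]; simp
        · simp only [Bool.not_eq_true] at h3
          have hs : vcStep (y, n, o) c = (y, n, true) := by simp [vcStep, h1, h2, h3]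
          have eY : gY c = false := by simp [gY, h2]
          have eN : gN c = false := by simp [gN, h3]
          have eO : gO c = true := by simp [gO, h1, h2, h3]
          rw [hs, ih, eY, eN, eO]; simp

-- A's all-over-the-filtered-list as a Bool identity over the raw list
theorem all_eq_not_anyYN (l : List Char) :
    (l.filter (fun a => !(a == ' ') && !(a == '-'))).all (fun c => c == 'Y')
      = !(l.any gN || l.any gO) := by
  induction l with
  | nil => simp
  | cons c t ih =>
    simp only [List.filter_cons, List.any_cons]
    by_cases h1 : c = '-'
    · simp [h1, ih, gN, gO, -List.all_filter]
    · by_cases h2 : c = ' '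
      · simp [h1, h2, ih, gN, gO, -List.all_filter]
      · by_cases h3 : c = 'Y'
        · simp [h1, h2, h3, ih, gN, gO, -List.all_filter]
        · by_cases h4 : c = 'N'
          · simp [h1, h2, h3, h4, ih, gN, gO, Bool.or_assoc, -List.all_filter]
          · have b1 : (c == '-') = false := by simp [h1]
            have b2 : (c == ' ') = false := by simp [h2]
            have b3 : (c == 'Y') = false := by simp [h3]
            have b4 : (c == 'N') = false := by simp [h4]
            simp [b1, b2, b3, b4, ih, gN, gO, Bool.or_assoc, -List.all_filter]

theorem all_eq_not_anyNY (l : List Char) :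
    (l.filter (fun a => !(a == ' ') && !(a == '-'))).all (fun c => c == 'N')
      = !(l.any gY || l.any gO) := by
  induction l with
  | nil => simp
  | cons c t ih =>
    simp only [List.filter_cons, List.any_cons]
    by_cases h1 : c = '-'
    · simp [h1, ih, gY, gO, -List.all_filter]
    · by_cases h2 : c = ' '
      · simp [h1, h2, ih, gY, gO, -List.all_filter]
      · by_cases h3 : c = 'Y'
        · simp [h1, h2, h3, ih, gY, gO, -List.all_filter]
        · by_cases h4 : c = 'N'
          · simp [h1, h2, h3, h4, ih, gY, gO, Bool.or_assoc, -List.all_filter]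
          · have b1 : (c == '-') = false := by simp [h1]
            have b2 : (c == ' ') = false := by simp [h2]
            have b3 : (c == 'Y') = false := by simp [h3]
            have b4 : (c == 'N') = false := by simp [h4]
            simp [b1, b2, b3, b4, ih, gY, gO, Bool.or_assoc, -List.all_filter]

-- ===== VERDICT (by name: the statement is the Claim_ definition above) =====
theorem verifier_chaine_spec : Claim_equal_verifier_chaine := by
  intro valeur _
  unfold Spec_verifier_chaine verifier_chaine verifier_chaine_alt
  have hrep : (PySem.Str.replace (PySem.Str.replace valeur "-" "") " " "").toList
      = valeur.toList.filter (fun a => !(a == ' ') && !(a == '-')) := by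
    simp [PySem.Str.toList_replace, replace_single, List.filter_filter]
  simp only [hrep, fold_any, Bool.false_or, all_eq_not_anyYN, all_eq_not_anyNY]
  cases hy : valeur.toList.any gY <;> cases hn : valeur.toList.any gN <;>
    cases ho : valeur.toList.any gO <;> rfl
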